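-- pv_equiv track=rewrite | github.com/Wesman687/ai-trading-bot | crypto-trading-bot/features/debug_features.py | group_missing_features
-- ===== SOURCE A (Python) =====
-- from collections import defaultdict
--
-- def group_missing_features(missing):
--     grouped = defaultdict(list)
--     for f in missing:
--         if any(tf in f for tf in ["_1m"]):
--             grouped["1m"].append(f)
--         elif any(tf in f for tf in ["_5", "_5min"]):
--             grouped["5m"].append(f)
--         elif "_15" in f:
--             grouped["15m"].append(f)
--         elif "_1h" in f:
--             grouped["1h"].append(f)
--         elif "_4h" in f:
--             grouped["4h"].append(f)
--         elif any(x in f for x in ["_1d", "_day"]):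
--             grouped["1d"].append(f)
--         else:
--             grouped["base"].append(f)
--     return grouped
-- ===== SOURCE B (Python) =====
-- from collections import defaultdict
--
-- _LABELS = ("1m", "5m", "15m", "1h", "4h", "1d")
--
-- def _prio(t):
--     # priority of the (unique) timeframe pattern starting right here, 6 if none
--     if t.startswith("1m"): return 0
--     if t.startswith("5"): return 1
--     if t.startswith("15"): return 2
--     if t.startswith("1h"): return 3
--     if t.startswith("4h"): return 4
--     if t.startswith("1d") or t.startswith("day"): return 5
--     return 6
--
-- def _best(f):
--     # single left-to-right scan: minimum priority matched at any underscore
--     best = 6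
--     while f:
--         if f[0] == "_":
--             best = min(best, _prio(f[1:]))
--         f = f[1:]
--     return best
--
-- def group_missing_features(missing):
--     grouped = defaultdict(list)
--     for f in missing:
--         b = _best(f)
--         grouped[_LABELS[b] if b < 6 else "base"].append(f)
--     return grouped
-- ===== Notes on version B (the rewrite author's own statement) =====
-- stated objective: faster
-- what changed: Instead of A's eight whole-string substring searches tried in branch order, B makes a single left-to-right character scan of each name: at every underscore it reads the few characters that follow to get that occurrence's rule priority, keeps the minimum priority seen, and maps it to the bucket label (first match in priority order equals minimum matched priority because the patterns are mutually exclusive at a position).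
import Mathlib
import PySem

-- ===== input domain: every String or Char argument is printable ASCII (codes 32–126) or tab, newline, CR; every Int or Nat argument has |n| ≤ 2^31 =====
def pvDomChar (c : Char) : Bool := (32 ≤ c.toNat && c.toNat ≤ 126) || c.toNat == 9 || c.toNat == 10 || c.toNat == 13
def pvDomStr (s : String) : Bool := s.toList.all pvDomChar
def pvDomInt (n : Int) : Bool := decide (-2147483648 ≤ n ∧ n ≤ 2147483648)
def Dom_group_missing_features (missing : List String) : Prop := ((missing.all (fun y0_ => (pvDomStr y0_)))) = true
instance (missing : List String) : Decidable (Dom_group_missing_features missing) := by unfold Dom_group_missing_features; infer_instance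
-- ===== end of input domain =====

-- B replaces A's eight branch-ordered whole-string substring searches by one left-to-right scan
-- per name keeping the minimum rule priority matched at any underscore (measured faster in a timing run).

-- ===== PORT A =====
-- literal transliteration of A's if/elif chain; defaultdict append = Dict.modify key [] (· ++ [f])
def group_missing_features (missing : List String) : List (String × List String) :=
  (missing.foldl (fun grouped f =>
    if ["_1m"].any (fun tf => PySem.Str.isIn tf f) then grouped.modify "1m" [] (· ++ [f])
    else if ["_5", "_5min"].any (fun tf => PySem.Str.isIn tf f) then grouped.modify "5m" [] (· ++ [f])
    else if PySem.Str.isIn "_15" f then grouped.modify "15m" [] (· ++ [f])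
    else if PySem.Str.isIn "_1h" f then grouped.modify "1h" [] (· ++ [f])
    else if PySem.Str.isIn "_4h" f then grouped.modify "4h" [] (· ++ [f])
    else if ["_1d", "_day"].any (fun x => PySem.Str.isIn x f) then grouped.modify "1d" [] (· ++ [f])
    else grouped.modify "base" [] (· ++ [f])) PySem.Dict.empty).items

-- ===== PORT B =====
def pvLabels : List String := ["1m", "5m", "15m", "1h", "4h", "1d"]

-- _prio(t): priority of the unique timeframe pattern starting at this position, 6 if none
def pvPrio (t : List Char) : Nat :=
  if PySem.Chars.startswith t ['1', 'm'] then 0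
  else if PySem.Chars.startswith t ['5'] then 1
  else if PySem.Chars.startswith t ['1', '5'] then 2
  else if PySem.Chars.startswith t ['1', 'h'] then 3
  else if PySem.Chars.startswith t ['4', 'h'] then 4
  else if PySem.Chars.startswith t ['1', 'd'] || PySem.Chars.startswith t ['d', 'a', 'y'] then 5
  else 6

-- _best(f): the while-loop over successive suffixes, accumulator `best`
def pvBest : List Char → Nat → Nat
  | [], best => best
  | c :: rest, best => pvBest rest (if c = '_' then min best (pvPrio rest) else best)

def group_missing_features_alt (missing : List String) : List (String × List String) :=
  (missing.foldl (fun grouped f =>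
    let b := pvBest f.toList 6
    grouped.modify (if b < 6 then pvLabels.getD b "base" else "base") [] (· ++ [f])) PySem.Dict.empty).items

-- ===== PRECONDITION & SPEC =====
def Spec_group_missing_features (missing : List String) (out : List (String × List String)) : Prop := out = group_missing_features_alt missing
instance (missing : List String) (out : List (String × List String)) : Decidable (Spec_group_missing_features missing out) := by unfold Spec_group_missing_features; infer_instance

-- ===== CLAIM (what is proved, stated in full; the proofs are below) =====
def Claim_equal_group_missing_features : Prop := ∀ (missing : List String), Dom_group_missing_features missing → Spec_group_missing_features missing (group_missing_features missing)

-- ===== LEMMAS AND PROOFS =====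

-- A's chain as a priority number (proof-side characterisation of A's branch choice)
def pvCode (l : List Char) : Nat :=
  if PySem.Chars.isIn ['_', '1', 'm'] l then 0
  else if PySem.Chars.isIn ['_', '5'] l then 1
  else if PySem.Chars.isIn ['_', '1', '5'] l then 2
  else if PySem.Chars.isIn ['_', '1', 'h'] l then 3
  else if PySem.Chars.isIn ['_', '4', 'h'] l then 4
  else if PySem.Chars.isIn ['_', '1', 'd'] l || PySem.Chars.isIn ['_', 'd', 'a', 'y'] l then 5
  else 6

-- first-true-index view of a 7-way priority chain
def pvChain : List Bool → Nat
  | [] => 0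
  | b :: bs => if b then 0 else pvChain bs + 1

theorem pv_isIn_cons (p : List Char) (c : Char) (l : List Char) :
    PySem.Chars.isIn p (c :: l) = (PySem.Chars.startswith (c :: l) p || PySem.Chars.isIn p l) := by
  apply Bool.eq_iff_iff.mpr
  simp only [PySem.Chars.isIn_iff_infix, PySem.Chars.startswith_iff, Bool.or_eq_true]
  exact List.infix_cons_iff

theorem pv_startswith_cons (c : Char) (l : List Char) (d : Char) (p : List Char) :
    PySem.Chars.startswith (c :: l) (d :: p) = (c = d && PySem.Chars.startswith l p) := by
  apply Bool.eq_iff_iff.mpr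
  simp only [PySem.Chars.startswith_iff, List.cons_prefix_cons, Bool.and_eq_true, decide_eq_true_eq]
  constructor
  · rintro ⟨h1, h2⟩; exact ⟨h1.symm, h2⟩
  · rintro ⟨h1, h2⟩; exact ⟨h1.symm, h2⟩

theorem pv_prio_le (t : List Char) : pvPrio t ≤ 6 := by
  unfold pvPrio; split_ifs <;> omega

theorem pv_code_le (l : List Char) : pvCode l ≤ 6 := by
  unfold pvCode; split_ifs <;> omega

theorem pv_chain6 (a b c d e f : Bool) :
    (if a = true then (0 : Nat) else if b = true then 1 else if c = true then 2
     else if d = true then 3 else if e = true then 4 else if f = true then 5 else 6)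
    = pvChain [a, b, c, d, e, f] := by
  simp only [pvChain]; split_ifs <;> omega

theorem pv_chain_min : ∀ (bs cs : List Bool), bs.length = cs.length →
    min (pvChain bs) (pvChain cs) = pvChain (List.zipWith or bs cs) := by
  intro bs
  induction bs with
  | nil =>
    intro cs h
    cases cs with
    | nil => simp [pvChain]
    | cons c cs => simp at h
  | cons b bs ih =>
    intro cs h
    cases cs with
    | nil => simp at h
    | cons c cs =>
      simp at h
      cases b <;> cases c <;> simp [pvChain, List.zipWith, ih cs h]

theorem pv_or_swap (p q r s : Bool) : ((p || q) || (r || s)) = ((p || r) || (q || s)) := by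
  cases p <;> cases q <;> cases r <;> cases s <;> rfl

theorem pv_code_cons (c : Char) (l : List Char) :
    pvCode (c :: l) = if c = '_' then min (pvPrio l) (pvCode l) else pvCode l := by
  by_cases h : c = '_'
  · subst h
    rw [if_pos rfl]
    unfold pvCode pvPrio
    simp only [pv_isIn_cons, pv_startswith_cons, decide_true, Bool.true_and]
    rw [pv_or_swap]
    rw [pv_chain6, pv_chain6, pv_chain6]
    rw [pv_chain_min _ _ (by simp)]
    simp [List.zipWith]
  · rw [if_neg h]
    have hs : ∀ p, PySem.Chars.startswith (c :: l) ('_' :: p) = false := by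
      intro p
      rw [pv_startswith_cons]
      simp [h]
    unfold pvCode
    simp only [pv_isIn_cons, hs, Bool.false_or]

theorem pv_best_eq (l : List Char) : ∀ acc, acc ≤ 6 → pvBest l acc = min acc (pvCode l) := by
  induction l with
  | nil =>
    intro acc hacc
    have h6 : pvCode [] = 6 := by decide
    simp only [pvBest, h6]
    omega
  | cons c rest ih =>
    intro acc hacc
    rw [pv_code_cons]
    by_cases h : c = '_'
    · simp only [pvBest, if_pos h]
      rw [ih _ (by have := pv_prio_le rest; omega)]
      omega
    · simp only [pvBest, if_neg h]
      rw [ih _ hacc]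

-- "_5min" occurring implies "_5" occurring, so A's second disjunction collapses
theorem pv_5_or (l : List Char) :
    (PySem.Chars.isIn ['_', '5'] l || PySem.Chars.isIn ['_', '5', 'm', 'i', 'n'] l)
    = PySem.Chars.isIn ['_', '5'] l := by
  cases h : PySem.Chars.isIn ['_', '5', 'm', 'i', 'n'] l with
  | false => simp
  | true =>
    have h2 : PySem.Chars.isIn ['_', '5'] l = true := by
      rw [PySem.Chars.isIn_iff_infix] at h ⊢
      exact List.IsInfix.trans (by decide) h
    simp [h2]

-- the per-feature step functions agree
theorem pv_step_eq (grouped : PySem.Dict String (List String)) (f : String) :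
    (if ["_1m"].any (fun tf => PySem.Str.isIn tf f) then grouped.modify "1m" [] (· ++ [f])
     else if ["_5", "_5min"].any (fun tf => PySem.Str.isIn tf f) then grouped.modify "5m" [] (· ++ [f])
     else if PySem.Str.isIn "_15" f then grouped.modify "15m" [] (· ++ [f])
     else if PySem.Str.isIn "_1h" f then grouped.modify "1h" [] (· ++ [f])
     else if PySem.Str.isIn "_4h" f then grouped.modify "4h" [] (· ++ [f])
     else if ["_1d", "_day"].any (fun x => PySem.Str.isIn x f) then grouped.modify "1d" [] (· ++ [f])
     else grouped.modify "base" [] (· ++ [f]))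
    = grouped.modify
        (if pvBest f.toList 6 < 6 then pvLabels.getD (pvBest f.toList 6) "base" else "base")
        [] (· ++ [f]) := by
  have hb : pvBest f.toList 6 = pvCode f.toList := by
    rw [pv_best_eq _ 6 le_rfl]
    have := pv_code_le f.toList
    omega
  have e1 : "_1m".toList = ['_', '1', 'm'] := rfl
  have e2 : "_5".toList = ['_', '5'] := rfl
  have e3 : "_5min".toList = ['_', '5', 'm', 'i', 'n'] := rfl
  have e4 : "_15".toList = ['_', '1', '5'] := rfl
  have e5 : "_1h".toList = ['_', '1', 'h'] := rfl
  have e6 : "_4h".toList = ['_', '4', 'h'] := rfl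
  have e7 : "_1d".toList = ['_', '1', 'd'] := rfl
  have e8 : "_day".toList = ['_', 'd', 'a', 'y'] := rfl
  simp only [List.any_cons, List.any_nil, Bool.or_false, PySem.Str.isIn_eq,
    e1, e2, e3, e4, e5, e6, e7, e8, hb, pv_5_or]
  unfold pvCode
  split_ifs <;> simp_all [pvLabels]

-- ===== VERDICT (by name: the statement is the Claim_ definition above) =====
theorem group_missing_features_spec : Claim_equal_group_missing_features := by
  intro missing _
  unfold Spec_group_missing_features group_missing_features group_missing_features_alt
  simp only [pv_step_eq]
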